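-- pv_equiv track=rewrite | github.com/fyp858585/interface_base | Report/ReportBase.py | getTestMethodName
-- ===== SOURCE A (Python) =====
-- def getTestMethodName(tracebackList:list)->str:
--     stackDescList = []
--     for i in tracebackList:
--         formatText = i.strip()
--         desc:str = formatText.split("\n")[0].strip()
--         if not desc.startswith("File"):
--             continue
--         if "Test.py" not in desc:
--             continue
--         stackDescList.append(desc)
--     return stackDescList[-1].split("in ")[-1]
-- ===== SOURCE B (Python) =====
-- def getTestMethodName(tracebackList: list) -> str:
--     # Scan backwards; the first qualifying frame from the end is the answer.
--     for raw in reversed(tracebackList):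
--         desc = raw.strip().split("\n")[0].strip()
--         if desc.startswith("File") and "Test.py" in desc:
--             return desc.split("in ")[-1]
--     raise IndexError("list index out of range")
-- ===== Notes on version B (the rewrite author's own statement) =====
-- stated objective: simpler
-- what changed: Instead of accumulating every qualifying frame description in a list and then indexing its last element, B scans the traceback in reverse with a combined guard and returns on the first hit, building no intermediate list.
import Mathlib
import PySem

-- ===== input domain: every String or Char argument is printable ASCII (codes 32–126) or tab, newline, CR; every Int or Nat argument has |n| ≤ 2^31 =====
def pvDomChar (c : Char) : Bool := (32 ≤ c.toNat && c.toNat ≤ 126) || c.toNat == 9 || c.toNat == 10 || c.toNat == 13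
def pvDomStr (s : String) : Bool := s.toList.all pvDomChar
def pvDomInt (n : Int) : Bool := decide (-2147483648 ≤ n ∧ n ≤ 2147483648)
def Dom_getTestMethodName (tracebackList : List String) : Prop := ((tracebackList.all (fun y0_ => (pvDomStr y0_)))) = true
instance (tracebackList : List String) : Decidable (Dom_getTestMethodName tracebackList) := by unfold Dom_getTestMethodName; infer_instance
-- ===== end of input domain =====

-- B replaces A's accumulate-all-matches-then-index-last by a reverse scan that returns at the
-- first qualifying frame (objective: simpler — no intermediate list).
-- Shared normalization of one traceback entry: i.strip().split("\n")[0].strip()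
def pvDesc (i : String) : String :=
  PySem.Str.strip (((PySem.Str.split? (PySem.Str.strip i) "\n").getD []).headI)

-- desc.split("in ")[-1] (splitOn is never empty, so the [-1] always succeeds)
def pvExtract (desc : String) : String :=
  ((PySem.List.pyGet? ((PySem.Str.split? desc "in ").getD []) (-1)).getD "")

-- ===== PORT A =====
def getTestMethodName (tracebackList : List String) : String :=
  match PySem.List.pyGet? (tracebackList.foldl (fun acc i =>
    let desc := pvDesc i
    if !(PySem.Str.startswith desc "File") then acc
    else if !(PySem.Str.isIn "Test.py" desc) then acc
    else acc ++ [desc]) []) (-1) with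
  | some d => pvExtract d
  | none => ""   -- Python raises IndexError here; excluded by Pre_

-- ===== PORT B =====
def pvGoB : List String → String
  | [] => ""     -- Python B raises IndexError here; excluded by Pre_
  | raw :: rest =>
    let desc := pvDesc raw
    if PySem.Str.startswith desc "File" && PySem.Str.isIn "Test.py" desc then
      pvExtract desc
    else pvGoB rest

def getTestMethodName_alt (tracebackList : List String) : String :=
  pvGoB tracebackList.reverse

-- ===== PRECONDITION & SPEC =====
def pvOk (i : String) : Bool :=
  PySem.Str.startswith (pvDesc i) "File" && PySem.Str.isIn "Test.py" (pvDesc i)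

-- Pre_: some entry qualifies; otherwise Python A raises IndexError on stackDescList[-1].
def Pre_getTestMethodName (tracebackList : List String) : Prop :=
  ∃ i ∈ tracebackList, pvOk i = true
instance (tracebackList : List String) : Decidable (Pre_getTestMethodName tracebackList) := by
  unfold Pre_getTestMethodName; infer_instance

def pvWitness_getTestMethodName : List String :=
  ["File \"C:/Test.py\", line 3, in testFoo"]

def Spec_getTestMethodName (tracebackList : List String) (out : String) : Prop :=
  out = getTestMethodName_alt tracebackList
instance (tracebackList : List String) (out : String) : Decidable (Spec_getTestMethodName tracebackList out) := by
  unfold Spec_getTestMethodName; infer_instance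

-- ===== CLAIM (what is proved, stated in full; the proofs are below) =====
def Claim_equal_getTestMethodName : Prop := ∀ (tracebackList : List String), Dom_getTestMethodName tracebackList → Pre_getTestMethodName tracebackList → Spec_getTestMethodName tracebackList (getTestMethodName tracebackList)

-- ===== LEMMAS AND PROOFS =====

-- A's loop body, rephrased with the combined guard pvOk.
theorem pvBodyA : (fun (acc : List String) (i : String) =>
      let desc := pvDesc i
      if !(PySem.Str.startswith desc "File") then acc
      else if !(PySem.Str.isIn "Test.py" desc) then acc
      else acc ++ [desc])
    = fun acc i => if pvOk i then acc ++ [pvDesc i] else acc := by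
  funext acc i
  show (if !(PySem.Str.startswith (pvDesc i) "File") then acc
        else if !(PySem.Str.isIn "Test.py" (pvDesc i)) then acc
        else acc ++ [pvDesc i]) = _
  unfold pvOk
  cases h1 : PySem.Str.startswith (pvDesc i) "File" <;>
    cases h2 : PySem.Str.isIn "Test.py" (pvDesc i) <;> rfl

-- A's loop accumulates exactly the normalized descriptions of the qualifying entries.
theorem pvFoldA (l : List String) (acc : List String) :
    l.foldl (fun acc i => if pvOk i then acc ++ [pvDesc i] else acc) acc
      = acc ++ (l.filter pvOk).map pvDesc := by
  induction l generalizing acc with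
  | nil => simp
  | cons x xs ih =>
    rw [List.foldl_cons, List.filter_cons]
    cases h : pvOk x
    · rw [if_neg (by simp [h]), ih]
      simp only [Bool.false_eq_true, if_false]
    · rw [if_pos rfl, ih]
      simp

-- B's scan returns the extraction at the first qualifying entry.
theorem pvGoB_eq (m : List String) :
    pvGoB m = match m.find? pvOk with
              | some x => pvExtract (pvDesc x)
              | none => "" := by
  induction m with
  | nil => rfl
  | cons x xs ih =>
    rw [show pvGoB (x :: xs)
          = if pvOk x then pvExtract (pvDesc x) else pvGoB xs from rfl]
    cases h : pvOk x <;> simp [h, ih]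

-- ===== VERDICT (by name: the statement is the Claim_ definition above) =====
theorem getTestMethodName_spec : Claim_equal_getTestMethodName := by
  intro l _ hpre
  unfold Spec_getTestMethodName getTestMethodName getTestMethodName_alt
  rw [pvBodyA, pvFoldA, pvGoB_eq, List.nil_append, PySem.List.pyGet?_neg_one,
    List.getLast?_map, ← List.head?_filter, List.filter_reverse, List.head?_reverse]
  obtain ⟨i, hi, hoki⟩ := hpre
  have hne : l.filter pvOk ≠ [] := List.ne_nil_of_mem (List.mem_filter.mpr ⟨hi, hoki⟩)
  cases hx : (l.filter pvOk).getLast? with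
  | none => exact absurd (List.getLast?_eq_none_iff.mp hx) hne
  | some x => rfl
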